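-- pv_equiv track=rewrite | github.com/hapusama/LoRa_data_analysis | utils/lora_decoder/coding.py | _pn9_sequence
-- ===== SOURCE A (Python) =====
-- def _pn9_sequence(length: int, seed: int = 0x01FF) -> list[int]:
--     state = seed & 0x1FF
--     out: list[int] = []
--     for _ in range(length):
--         b = 0
--         for i in range(8):
--             new_bit = ((state >> 5) ^ state) & 1
--             state = ((state >> 1) | (new_bit << 8)) & 0x1FF
--             b |= (state & 1) << i
--         out.append(b)
--     return out
-- ===== SOURCE B (Python) =====
-- def _pn9_row(s: int) -> tuple[int, int]:
--     """One table row: the byte emitted from 9-bit state s and the next state."""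
--     st = s
--     b = 0
--     for i in range(8):
--         new_bit = ((st >> 5) ^ st) & 1
--         st = ((st >> 1) | (new_bit << 8)) & 0x1FF
--         b |= (st & 1) << i
--     return (b, st)
--
--
-- _PN9_TABLE = [_pn9_row(s) for s in range(512)]
--
--
-- def _pn9_sequence(length: int, seed: int = 0x01FF) -> list[int]:
--     out: list[int] = []
--     state = seed & 0x1FF
--     for _ in range(length):
--         b, state = _PN9_TABLE[state]
--         out.append(b)
--     return out
-- ===== Notes on version B (the rewrite author's own statement) =====
-- stated objective: faster
-- what changed: Replaces the per-byte 8-step LFSR inner loop with a precomputed 512-entry transition table (byte, next_state) indexed by the 9-bit state, so emission is a single flat table-lookup loop.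
import Mathlib
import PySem

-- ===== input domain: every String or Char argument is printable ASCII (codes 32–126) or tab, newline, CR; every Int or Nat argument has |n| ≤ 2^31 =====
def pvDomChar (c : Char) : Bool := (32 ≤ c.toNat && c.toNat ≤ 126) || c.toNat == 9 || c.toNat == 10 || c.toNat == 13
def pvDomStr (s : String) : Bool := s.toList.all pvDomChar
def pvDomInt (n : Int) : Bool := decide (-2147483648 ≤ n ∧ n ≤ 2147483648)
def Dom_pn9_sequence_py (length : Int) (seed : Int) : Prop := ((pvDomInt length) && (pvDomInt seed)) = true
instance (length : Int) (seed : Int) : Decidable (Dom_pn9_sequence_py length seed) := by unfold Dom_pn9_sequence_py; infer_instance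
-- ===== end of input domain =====

-- B replaces the per-byte 8-step LFSR inner loop by a precomputed 512-entry state-transition table
-- and a single flat lookup loop (objective: faster, constant-factor).

-- ===== PORT A =====
def pn9_sequence_py (length : Int) (seed : Int) : List Int :=
  let state := PySem.Int.band seed 0x1FF
  let r := (PySem.List.pyRange 0 length 1).foldl
    (fun (acc : Int × List Int) _ =>
      let inner := (List.range 8).foldl
        (fun (p : Int × Int) (i : Nat) =>
          let new_bit := PySem.Int.band (PySem.Int.bxor (p.2 >>> (5 : Nat)) p.2) 1
          let st := PySem.Int.band (PySem.Int.bor (p.2 >>> (1 : Nat)) (new_bit <<< (8 : Nat))) 0x1FF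
          (PySem.Int.bor p.1 (PySem.Int.band st 1 <<< i), st))
        (0, acc.1)
      (inner.2, acc.2 ++ [inner.1]))
    (state, [])
  r.2

-- ===== PORT B =====
-- one table row: the byte emitted from 9-bit state s and the next state
def pvStepRow (s : Int) : Int × Int :=
  let r := (List.range 8).foldl
    (fun (p : Int × Int) (i : Nat) =>
      let new_bit := PySem.Int.band (PySem.Int.bxor (p.2 >>> (5 : Nat)) p.2) 1
      let st := PySem.Int.band (PySem.Int.bor (p.2 >>> (1 : Nat)) (new_bit <<< (8 : Nat))) 0x1FF
      (PySem.Int.bor p.1 (PySem.Int.band st 1 <<< i), st))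
    (0, s)
  (r.1, r.2)

-- the module-level 512-entry transition table of Source B
def pvTable : List (Int × Int) := (PySem.List.pyRange 0 512 1).map pvStepRow

def pn9_sequence_py_alt (length : Int) (seed : Int) : List Int :=
  let r := (PySem.List.pyRange 0 length 1).foldl
    (fun (acc : List Int × Int) _ =>
      let row := PySem.List.pyGetD pvTable acc.2 (0, 0)   -- default never used: state is always in range
      (acc.1 ++ [row.1], row.2))
    ([], PySem.Int.band seed 0x1FF)
  r.1

-- ===== PRECONDITION & SPEC =====
def Spec_pn9_sequence_py (length : Int) (seed : Int) (out : List Int) : Prop := out = pn9_sequence_py_alt length seed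
instance (length : Int) (seed : Int) (out : List Int) : Decidable (Spec_pn9_sequence_py length seed out) := by unfold Spec_pn9_sequence_py; infer_instance

-- ===== CLAIM (what is proved, stated in full; the proofs are below) =====
def Claim_equal_pn9_sequence_py : Prop := ∀ (length : Int) (seed : Int), Dom_pn9_sequence_py length seed → Spec_pn9_sequence_py length seed (pn9_sequence_py length seed)

-- ===== LEMMAS AND PROOFS =====

-- masking with 0x1FF yields a value in [0, 512)
theorem pvBand511_bounds (x : Int) : 0 ≤ PySem.Int.band x 511 ∧ PySem.Int.band x 511 < 512 := by
  unfold PySem.Int.band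
  split_ifs with h1 h2 h2
  · have := Nat.and_le_right (n := x.toNat) (m := Int.toNat 511)
    omega
  · omega
  · omega
  · omega

theorem pvStepRow_snd_bounds (s : Int) : 0 ≤ (pvStepRow s).2 ∧ (pvStepRow s).2 < 512 := by
  unfold pvStepRow
  rw [show (8 : Nat) = 7 + 1 from rfl, List.range_succ, List.foldl_append]
  simp only [List.foldl_cons, List.foldl_nil]
  exact pvBand511_bounds _

theorem pvTable_lookup (st : Int) (h0 : 0 ≤ st) (h1 : st < 512) :
    PySem.List.pyGetD pvTable st (0, 0) = pvStepRow st := by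
  unfold pvTable
  exact PySem.List.pyGetD_map_pyRange_of_nonneg pvStepRow 512 st (0, 0) h0 h1

theorem pvLoop_eq (l : List Int) (st : Int) (out : List Int)
    (h0 : 0 ≤ st) (h1 : st < 512) :
    (l.foldl
      (fun (acc : Int × List Int) _ =>
        let inner := (List.range 8).foldl
          (fun (p : Int × Int) (i : Nat) =>
            let new_bit := PySem.Int.band (PySem.Int.bxor (p.2 >>> (5 : Nat)) p.2) 1
            let st := PySem.Int.band (PySem.Int.bor (p.2 >>> (1 : Nat)) (new_bit <<< (8 : Nat))) 0x1FF
            (PySem.Int.bor p.1 (PySem.Int.band st 1 <<< i), st))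
          (0, acc.1)
        (inner.2, acc.2 ++ [inner.1]))
      (st, out)).2
    = (l.foldl
        (fun (acc : List Int × Int) _ =>
          let row := PySem.List.pyGetD pvTable acc.2 (0, 0)
          (acc.1 ++ [row.1], row.2))
        (out, st)).1 := by
  induction l generalizing st out with
  | nil => rfl
  | cons a l ih =>
      simp only [List.foldl_cons, pvTable_lookup st h0 h1]
      exact ih (pvStepRow st).2 (out ++ [(pvStepRow st).1])
        (pvStepRow_snd_bounds st).1 (pvStepRow_snd_bounds st).2

-- ===== VERDICT (by name: the statement is the Claim_ definition above) =====
theorem pn9_sequence_py_spec : Claim_equal_pn9_sequence_py := by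
  intro length seed _
  unfold Spec_pn9_sequence_py pn9_sequence_py pn9_sequence_py_alt
  exact pvLoop_eq (PySem.List.pyRange 0 length 1) (PySem.Int.band seed 0x1FF) []
    (pvBand511_bounds seed).1 (pvBand511_bounds seed).2
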